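-- pv_equiv track=rewrite | github.com/Snens98/ai-chatbot | helper.py | replaceBracketThatCodeCanStored
-- ===== SOURCE A (Python) =====
-- def replaceBracketThatCodeCanStored(text):
--     modified_text = ""
--     for char in text:
--         if char == "{":
--             modified_text += "{{"
--         elif char == "}":
--             modified_text += "}}"
--         else:
--             modified_text += char
--     return modified_text
-- ===== SOURCE B (Python) =====
-- def replaceBracketThatCodeCanStored(text):
--     return text.replace("{", "{{").replace("}", "}}")
-- ===== Notes on version B (the rewrite author's own statement) =====
-- stated objective: faster
-- what changed: Replaces the char-by-char accumulating loop with two whole-string str.replace passes; the first pass only emits open braces so the second pass cannot touch its output, giving identical results.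
import Mathlib
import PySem

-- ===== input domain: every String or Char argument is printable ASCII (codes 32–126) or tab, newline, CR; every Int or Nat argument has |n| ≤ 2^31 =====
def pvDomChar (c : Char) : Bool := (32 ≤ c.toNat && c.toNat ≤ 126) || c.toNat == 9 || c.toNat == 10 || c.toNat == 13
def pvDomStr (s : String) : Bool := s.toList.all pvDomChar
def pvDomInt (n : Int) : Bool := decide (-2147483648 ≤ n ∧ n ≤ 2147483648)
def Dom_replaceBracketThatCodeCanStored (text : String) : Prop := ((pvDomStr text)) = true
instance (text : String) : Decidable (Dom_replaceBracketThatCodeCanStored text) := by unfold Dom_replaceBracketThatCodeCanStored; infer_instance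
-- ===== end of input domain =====

-- ===== PORT A =====
-- B doubles the braces with two str.replace passes instead of A's char-by-char loop (measurably faster in a timing run; return values proved equal).
-- port of A: char-by-char loop accumulating into modified_text
def replaceBracketThatCodeCanStored (text : String) : String :=
  text.toList.foldl
    (fun modified_text char =>
      if char = '{' then modified_text ++ "{{"
      else if char = '}' then modified_text ++ "}}"
      else modified_text ++ String.ofList [char])
    ""

-- ===== PORT B =====
-- port of B: text.replace("{", "{{").replace("}", "}}")
def replaceBracketThatCodeCanStored_alt (text : String) : String :=
  PySem.Str.replace (PySem.Str.replace text "{" "{{") "}" "}}"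

-- ===== PRECONDITION & SPEC =====
def Spec_replaceBracketThatCodeCanStored (text : String) (out : String) : Prop := out = replaceBracketThatCodeCanStored_alt text
instance (text : String) (out : String) : Decidable (Spec_replaceBracketThatCodeCanStored text out) := by unfold Spec_replaceBracketThatCodeCanStored; infer_instance

-- ===== CLAIM (what is proved, stated in full; the proofs are below) =====
def Claim_equal_replaceBracketThatCodeCanStored : Prop := ∀ (text : String), Dom_replaceBracketThatCodeCanStored text → Spec_replaceBracketThatCodeCanStored text (replaceBracketThatCodeCanStored text)

-- ===== LEMMAS AND PROOFS =====

-- single-character str.replace is a flatMap of a per-character substitution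
theorem go_single (o : Char) (new : List Char) (l acc : List Char) (fuel : Nat)
    (h : l.length ≤ fuel) :
    PySem.Chars.replace.go [o] new fuel l acc =
      acc.reverse ++ l.flatMap (fun c => if c = o then new else [c]) := by
  induction l generalizing fuel acc with
  | nil =>
    cases fuel <;> simp [PySem.Chars.replace.go]
  | cons c t ih =>
    cases fuel with
    | zero => simp at h
    | succ f =>
      simp only [List.length_cons, Nat.succ_le_succ_iff] at h
      rw [PySem.Chars.replace.go]
      by_cases hc : c = o
      · subst hc
        have hp : List.isPrefixOf [c] (c :: t) = true := by
          simp [List.isPrefixOf]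
        simp only [hp]
        rw [if_pos trivial, show List.drop [c].length (c :: t) = t from rfl, ih _ _ h]
        simp [List.flatMap_cons]
      · have hp : List.isPrefixOf [o] (c :: t) = false := by
          simp [List.isPrefixOf]
          exact fun h => absurd h.symm hc
        simp only [hp, Bool.false_eq_true, if_false]
        rw [ih _ _ h]
        simp [List.flatMap_cons, hc]

theorem replace_single (o : Char) (new cs : List Char) :
    PySem.Chars.replace cs [o] new = cs.flatMap (fun c => if c = o then new else [c]) := by
  rw [PySem.Chars.replace]
  simp only [List.isEmpty_cons, Bool.false_eq_true, if_false]
  rw [go_single o new cs [] cs.length le_rfl]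
  simp

-- the doubling function both pipelines compute
def pvDouble (c : Char) : List Char :=
  if c = '{' then ['{', '{'] else if c = '}' then ['}', '}'] else [c]

theorem foldl_toList (l : List Char) (s : String) :
    (l.foldl
      (fun modified_text char =>
        if char = '{' then modified_text ++ "{{"
        else if char = '}' then modified_text ++ "}}"
        else modified_text ++ String.ofList [char])
      s).toList = s.toList ++ l.flatMap pvDouble := by
  induction l generalizing s with
  | nil => simp
  | cons c t ih =>
    simp only [List.foldl_cons, List.flatMap_cons]
    by_cases h1 : c = '{'
    · subst h1; rw [ih]; simp [pvDouble]
    · by_cases h2 : c = '}'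
      · subst h2; rw [ih]; simp [pvDouble]
      · simp only [h1, h2, if_false]
        rw [ih]; simp [pvDouble, h1, h2]

theorem alt_toList (text : String) :
    (replaceBracketThatCodeCanStored_alt text).toList = text.toList.flatMap pvDouble := by
  unfold replaceBracketThatCodeCanStored_alt
  unfold PySem.Str.replace
  simp only [String.toList_ofList]
  rw [show ("{" : String).toList = ['{'] from rfl, show ("}" : String).toList = ['}'] from rfl,
      show ("{{" : String).toList = ['{', '{'] from rfl, show ("}}" : String).toList = ['}', '}'] from rfl]
  rw [replace_single, replace_single, List.flatMap_assoc]
  apply List.flatMap_congr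
  intro c _
  by_cases h1 : c = '{'
  · subst h1; simp [pvDouble]
  · by_cases h2 : c = '}'
    · subst h2; simp [pvDouble]
    · simp [pvDouble, h1, h2]

-- ===== VERDICT (by name: the statement is the Claim_ definition above) =====
theorem replaceBracketThatCodeCanStored_spec : Claim_equal_replaceBracketThatCodeCanStored := by
  intro text _
  unfold Spec_replaceBracketThatCodeCanStored
  apply String.ext  -- strings equal iff their char lists are
  rw [alt_toList]
  unfold replaceBracketThatCodeCanStored
  rw [foldl_toList]
  rfl
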